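-- pv_equiv track=rewrite | github.com/XtraWyze/AI-PC-Assistant | local_ai_assistant/modules/file_indexer.py | tokenize_text_for_keywords
-- ===== SOURCE A (Python) =====
-- from typing import Iterable, List, Optional, Set
--
-- def tokenize_text_for_keywords(text: str) -> List[str]:
--     """Break text into lowercase keywords with punctuation removed."""
--     cleaned = []
--     current = []
--     for char in text.lower():
--         if char.isalnum():
--             current.append(char)
--         else:
--             current.append(" ")
--     merged = "".join(current)
--     seen = set()
--     for token in merged.split():
--         if len(token) < 3:
--             continue
--         if token in seen:
--             continue
--         seen.add(token)
--         cleaned.append(token)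
--     return cleaned
-- ===== SOURCE B (Python) =====
-- def tokenize_text_for_keywords(text):
--     """Break text into lowercase keywords with punctuation removed.
--
--     Single-pass scanner: buffer alnum chars, flush at every boundary."""
--     result = []
--     seen = set()
--     buf = []
--
--     def flush():
--         token = "".join(buf)
--         if len(token) >= 3 and token not in seen:
--             seen.add(token)
--             result.append(token)
--         buf.clear()
--
--     for ch in text.lower():
--         if ch.isalnum():
--             buf.append(ch)
--         else:
--             flush()
--     flush()
--     return result
-- ===== Notes on version B (the rewrite author's own statement) =====
-- stated objective: alternative
-- what changed: Replaced A's three-pass pipeline (build a cleaned copy of the text, re-split it on whitespace, then a dedup pass) with a single character-level scan that buffers alphanumeric runs and flushes each token at a boundary, so no intermediate cleaned string or split pass exists.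
import Mathlib
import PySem

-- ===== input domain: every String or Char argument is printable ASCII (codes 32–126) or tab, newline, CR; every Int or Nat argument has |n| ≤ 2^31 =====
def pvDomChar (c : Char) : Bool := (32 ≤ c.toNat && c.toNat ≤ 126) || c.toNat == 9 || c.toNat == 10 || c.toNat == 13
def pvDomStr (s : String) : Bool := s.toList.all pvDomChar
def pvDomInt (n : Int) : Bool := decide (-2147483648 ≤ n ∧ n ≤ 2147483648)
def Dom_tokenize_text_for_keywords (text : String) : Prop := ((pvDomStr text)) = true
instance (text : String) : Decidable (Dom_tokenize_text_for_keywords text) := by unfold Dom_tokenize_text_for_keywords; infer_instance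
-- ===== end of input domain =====

-- B is an alternative single-pass scanner (buffer alnum runs, flush at boundaries);
-- A builds a cleaned copy, splits it on whitespace, then dedups in a second pass.

-- ===== PORT A =====
def tokenize_text_for_keywords (text : String) : List String :=
  -- current: each char of text.lower(), punctuation replaced by a space
  let current : List Char :=
    (PySem.Chars.lower text.toList).map
      (fun char => if PySem.Chars.isalnum char then char else ' ')
  let merged : List Char := current            -- "".join(current)
  -- for token in merged.split(): skip len<3 and already-seen, else record
  let res :=
    (PySem.Chars.split₀ merged).foldl
      (fun (st : List (List Char) × PySem.Set (List Char)) token =>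
        if token.length < 3 then st
        else if st.2.contains token then st
        else (st.1 ++ [token], st.2.add token))
      ([], PySem.Set.ofList [])
  res.1.map String.ofList

-- ===== PORT B =====
-- flush(): emit the buffered token if long enough and unseen (Source B's flush)
def tokFlush (st : List (List Char) × PySem.Set (List Char)) (buf : List Char) :
    List (List Char) × PySem.Set (List Char) :=
  if 3 ≤ buf.length && !(st.2.contains buf) then (st.1 ++ [buf], st.2.add buf) else st

def tokenize_text_for_keywords_alt (text : String) : List String :=
  -- one scan over text.lower(): state = (buf, (result, seen))
  let fin :=
    (PySem.Chars.lower text.toList).foldl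
      (fun (s : List Char × (List (List Char) × PySem.Set (List Char))) ch =>
        if PySem.Chars.isalnum ch then (s.1 ++ [ch], s.2) else ([], tokFlush s.2 s.1))
      ([], ([], PySem.Set.ofList []))
  (tokFlush fin.2 fin.1).1.map String.ofList

-- ===== PRECONDITION & SPEC =====
def Spec_tokenize_text_for_keywords (text : String) (out : List String) : Prop := out = tokenize_text_for_keywords_alt text
instance (text : String) (out : List String) : Decidable (Spec_tokenize_text_for_keywords text out) := by unfold Spec_tokenize_text_for_keywords; infer_instance

-- ===== CLAIM (what is proved, stated in full; the proofs are below) =====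
def Claim_equal_tokenize_text_for_keywords : Prop := ∀ (text : String), Dom_tokenize_text_for_keywords text → Spec_tokenize_text_for_keywords text (tokenize_text_for_keywords text)

-- ===== LEMMAS AND PROOFS =====

-- A's dedup fold function
def pvStepA (st : List (List Char) × PySem.Set (List Char)) (token : List Char) :
    List (List Char) × PySem.Set (List Char) :=
  if token.length < 3 then st
  else if st.2.contains token then st
  else (st.1 ++ [token], st.2.add token)

-- B's scan step
def pvStepB (s : List Char × (List (List Char) × PySem.Set (List Char))) (ch : Char) :
    List Char × (List (List Char) × PySem.Set (List Char)) :=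
  if PySem.Chars.isalnum ch then (s.1 ++ [ch], s.2) else ([], tokFlush s.2 s.1)

lemma tokFlush_eq_stepA (st : List (List Char) × PySem.Set (List Char)) (buf : List Char) :
    tokFlush st buf = pvStepA st buf := by
  unfold tokFlush pvStepA
  split_ifs with h1 h2 h3 <;> simp_all
  omega

lemma tokFlush_nil (st : List (List Char) × PySem.Set (List Char)) : tokFlush st [] = st := by
  simp [tokFlush]

lemma alnum_not_space (c : Char) (h : PySem.Chars.isalnum c = true) :
    PySem.Chars.isspace c = false := by
  simp only [PySem.Chars.isalnum, PySem.Chars.isalpha, PySem.Chars.isupper,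
    PySem.Chars.islower, PySem.Chars.isdigit, Bool.or_eq_true, Bool.and_eq_true,
    decide_eq_true_eq, Char.le_def] at h
  simp only [PySem.Chars.isspace, Char.toNat]
  rcases h with (h | h) | h <;>
    · have h1 := h.1
      have h2 := h.2
      simp only [UInt32.le_iff_toNat_le] at h1 h2
      simp only [show ('A').val.toNat = 65 from rfl, show ('Z').val.toNat = 90 from rfl,
        show ('a').val.toNat = 97 from rfl, show ('z').val.toNat = 122 from rfl,
        show ('0').val.toNat = 48 from rfl, show ('9').val.toNat = 57 from rfl] at h1 h2
      simp only [decide_eq_false_iff_not, Bool.or_eq_false_iff, Bool.and_eq_false_iff]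
      omega

lemma go_acc (cs : List Char) : ∀ (cur : List Char) (acc : List (List Char)),
    PySem.Chars.split₀.go cs cur acc = acc.reverse ++ PySem.Chars.split₀.go cs cur [] := by
  induction cs with
  | nil =>
    intro cur acc
    simp only [PySem.Chars.split₀.go]
    split <;> simp
  | cons c rest ih =>
    intro cur acc
    simp only [PySem.Chars.split₀.go]
    split
    · split
      · rw [ih [] acc]
      · rw [ih [] (cur.reverse :: acc), ih [] [cur.reverse]]
        simp
    · exact ih (c :: cur) acc

lemma scan_eq (cs : List Char) : ∀ (buf : List Char)
    (st : List (List Char) × PySem.Set (List Char)),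
    (let fin := cs.foldl pvStepB (buf, st); tokFlush fin.2 fin.1) =
      List.foldl pvStepA st
        (PySem.Chars.split₀.go
          (cs.map (fun char => if PySem.Chars.isalnum char then char else ' ')) buf.reverse []) := by
  induction cs with
  | nil =>
    intro buf st
    simp only [List.foldl_nil, List.map_nil, PySem.Chars.split₀.go]
    rcases buf with _ | ⟨b, bs⟩
    · simp [tokFlush_nil]
    · simp [tokFlush_eq_stepA]
  | cons c rest ih =>
    intro buf st
    simp only [List.foldl_cons, List.map_cons]
    by_cases hc : PySem.Chars.isalnum c = true
    · rw [show pvStepB (buf, st) c = (buf ++ [c], st) by simp [pvStepB, hc]]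
      rw [ih (buf ++ [c]) st]
      simp only [if_pos hc, PySem.Chars.split₀.go, alnum_not_space c hc]
      simp
    · rw [show pvStepB (buf, st) c = ([], tokFlush st buf) by simp [pvStepB, hc]]
      rw [ih [] (tokFlush st buf)]
      simp only [if_neg hc, PySem.Chars.split₀.go]
      have hsp : PySem.Chars.isspace ' ' = true := by decide
      rw [if_pos hsp]
      rcases buf with _ | ⟨b, bs⟩
      · simp [tokFlush_nil]
      · rw [if_neg (by simp)]
        rw [go_acc _ [] [(b :: bs).reverse.reverse]]
        simp [tokFlush_eq_stepA]

-- ===== VERDICT (by name: the statement is the Claim_ definition above) =====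
theorem tokenize_text_for_keywords_spec : Claim_equal_tokenize_text_for_keywords := by
  intro text _
  show tokenize_text_for_keywords text = tokenize_text_for_keywords_alt text
  have h := scan_eq (PySem.Chars.lower text.toList) [] ([], PySem.Set.ofList [])
  simp only [List.reverse_nil] at h
  simp only [tokenize_text_for_keywords, tokenize_text_for_keywords_alt, PySem.Chars.split₀]
  rw [show (fun (s : List Char × (List (List Char) × PySem.Set (List Char))) ch =>
        if PySem.Chars.isalnum ch then (s.1 ++ [ch], s.2) else ([], tokFlush s.2 s.1)) = pvStepB
      from rfl,
    show (fun (st : List (List Char) × PySem.Set (List Char)) token =>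
        if token.length < 3 then st
        else if st.2.contains token then st
        else (st.1 ++ [token], st.2.add token)) = pvStepA from rfl]
  rw [← h]
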